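-- pv_equiv track=rewrite | github.com/cafrii/omega2 | 백준/Gold/16562. 친구비/친구비.py | solve
-- ===== SOURCE A (Python) =====
-- MAX_Ai = 10_000
--
-- def solve(N:int, K:int, A:list[int], friends:list[tuple[int,int]])->int:
--     '''
--     Args:
--         A[k]: 노드 k+1 의 cost
--         K: budget
--     Returns:
--         min cost
--         or -1 in case of over-budget
--     '''
--     # A 는 index-0 부터 시작하니까 앞에 0을 하나 추가해 주었음.
--     roots, costs = list(range(N+1)), [0]+A
--
--     def find_root(a:int)->tuple[int,int]:
--         '''
--         Returns: tuple (root, cost)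
--             root 는 이 분리 집합의 대표 (subtree root)
--             cost 는 이 집합 내의 최소 비용
--         '''
--         if roots[a] == a: return roots[a],costs[a]
--         stack = []
--         min_cost = MAX_Ai
--         while a != roots[a]:
--             stack.append(a)
--             min_cost = min(min_cost, costs[a])
--             a = roots[a]
--         # now, a is root of dsu
--         min_cost = min(min_cost, costs[a])
--         for k in stack:
--             roots[k] = a
--             costs[k] = min_cost
--         return roots[a],costs[a]
--
--     # dsu 구성
--     for a,b in friends:
--         ra,ca = find_root(a)
--         rb,cb = find_root(b)
--         if ra == rb: continue
--         roots[b] = roots[rb] = a # updating node only is ok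
--         costs[ra] = min(ca, cb)
--
--     # 각 집합의 대표 수 카운트하면서 소요 비용 합.
--     total_cost = 0
--     for a in range(1,N+1):
--         if a != roots[a]: continue # not root
--         total_cost += costs[a]
--
--     return total_cost if total_cost <= K else -1
-- ===== SOURCE B (Python) =====
-- def solve(N: int, K: int, A: list[int], friends: list[tuple[int, int]]) -> int:
--     # Component merging over explicit member lists: start with one singleton
--     # group per node, merge the two groups an edge connects, then sum the
--     # per-group minima and compare with the budget.
--     groups = [([i], A[i - 1]) for i in range(1, N + 1)]
--     for a, b in friends:
--         ia = next(i for i, g in enumerate(groups) if a in g[0])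
--         ib = next(i for i, g in enumerate(groups) if b in g[0])
--         if ia == ib:
--             continue
--         merged = (groups[ia][0] + groups[ib][0],
--                   min(groups[ia][1], groups[ib][1]))
--         groups = [g for i, g in enumerate(groups) if i != ia and i != ib] + [merged]
--     total = sum(m for _, m in groups)
--     return total if total <= K else -1
-- ===== Notes on version B (the rewrite author's own statement) =====
-- stated objective: alternative
-- what changed: Replaces the path-compressing union-find over parent/cost arrays with direct merging of explicit component member-lists (one (members, min-cost) group per component), summing the per-group minima at the end.
-- outside the precondition, e.g. on solve(2, 100, [3, 4], [(-1, 2)]): A returns 7, B raises StopIteration; on solve(2, 100, [3, 4], [(0, 2)]): A returns 3, B raises StopIteration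
import Mathlib
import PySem

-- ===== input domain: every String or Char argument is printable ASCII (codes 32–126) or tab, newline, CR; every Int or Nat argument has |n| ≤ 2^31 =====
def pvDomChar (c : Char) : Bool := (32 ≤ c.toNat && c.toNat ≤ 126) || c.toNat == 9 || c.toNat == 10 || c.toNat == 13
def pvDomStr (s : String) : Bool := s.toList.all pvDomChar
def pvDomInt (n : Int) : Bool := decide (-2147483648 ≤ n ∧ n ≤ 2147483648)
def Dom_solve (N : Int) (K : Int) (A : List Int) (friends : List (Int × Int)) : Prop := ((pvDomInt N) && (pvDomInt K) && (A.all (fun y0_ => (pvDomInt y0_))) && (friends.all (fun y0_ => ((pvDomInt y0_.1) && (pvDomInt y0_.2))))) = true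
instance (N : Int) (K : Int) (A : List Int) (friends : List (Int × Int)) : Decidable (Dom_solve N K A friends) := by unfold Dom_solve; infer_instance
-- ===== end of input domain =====

-- B replaces A's path-compressing union-find with direct merging of explicit component
-- member-lists (objective: alternative, same answer, no speed claim).

-- ===== PORT A =====
-- Python list read xs[i]; the .getD 0 default is unreachable under Pre_solve
-- (Python raises IndexError exactly where pyGet? is none).
def pvGetA (xs : List Int) (i : Int) : Int := (PySem.List.pyGet? xs i).getD 0

-- Python assignment xs[i] = v; under Pre_solve every written index i is
-- nonnegative and in range, where List.set is exact.
def pvSetA (xs : List Int) (i : Int) (v : Int) : List Int := xs.set i.toNat v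

-- the 'while a != roots[a]' loop of find_root; fuel only makes it total
-- (under Pre_solve the parent forest is acyclic and fuel is never exhausted)
def findLoopA (roots costs : List Int) : Nat → Int → List Int → Int → List Int × Int × Int
  | 0, a, stack, mc => (stack, mc, a)
  | fuel+1, a, stack, mc =>
    if pvGetA roots a = a then (stack, mc, a)
    else findLoopA roots costs fuel (pvGetA roots a) (stack ++ [a]) (min mc (pvGetA costs a))

-- find_root: fast path, chase loop (min_cost starts at MAX_Ai = 10000),
-- min with the root's cost, compression loop, return (roots[a], costs[a])
def findRootA (roots costs : List Int) (a : Int) : (List Int × List Int) × Int × Int :=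
  if pvGetA roots a = a then ((roots, costs), pvGetA roots a, pvGetA costs a)
  else
    let t := findLoopA roots costs (roots.length + 1) a [] 10000
    let mc := min t.2.1 (pvGetA costs t.2.2)
    let rc := t.1.foldl (fun (p : List Int × List Int) k => (pvSetA p.1 k t.2.2, pvSetA p.2 k mc)) (roots, costs)
    (rc, pvGetA rc.1 t.2.2, pvGetA rc.2 t.2.2)

-- one iteration of the 'for a,b in friends' union loop
def unionA (s : List Int × List Int) (e : Int × Int) : List Int × List Int :=
  let f1 := findRootA s.1 s.2 e.1
  let f2 := findRootA f1.1.1 f1.1.2 e.2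
  if f1.2.1 = f2.2.1 then f2.1
  else (pvSetA (pvSetA f2.1.1 e.2 e.1) f2.2.1 e.1, pvSetA f2.1.2 f1.2.1 (min f1.2.2 f2.2.2))

def solve (N : Int) (K : Int) (A : List Int) (friends : List (Int × Int)) : Int :=
  let fin := friends.foldl unionA (PySem.List.pyRange 0 (N+1) 1, (0 : Int) :: A)
  let total := (PySem.List.pyRange 1 (N+1) 1).foldl
      (fun t a => if pvGetA fin.1 a ≠ a then t else t + pvGetA fin.2 a) 0
  if total ≤ K then total else -1

-- ===== PORT B =====
-- merge step for one edge; the fallthrough when an endpoint is in no group is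
-- unreachable under Pre_solve (Python's next(...) raises StopIteration there)
def mergeB (groups : List (List Int × Int)) (e : Int × Int) : List (List Int × Int) :=
  match groups.findIdx? (fun g => g.1.contains e.1), groups.findIdx? (fun g => g.1.contains e.2) with
  | some ia, some ib =>
    if ia = ib then groups
    else
      let ga := groups.getD ia ([], 0)
      let gb := groups.getD ib ([], 0)
      ((PySem.List.enumerate groups).filterMap
          (fun p => if p.1 = (ia : Int) ∨ p.1 = (ib : Int) then none else some p.2))
        ++ [(ga.1 ++ gb.1, min ga.2 gb.2)]
  | _, _ => groups

def solve_alt (N : Int) (K : Int) (A : List Int) (friends : List (Int × Int)) : Int :=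
  let groups := (PySem.List.pyRange 1 (N+1) 1).map (fun i => ([i], pvGetA A (i-1)))
  let fin := friends.foldl mergeB groups
  let total := (fin.map (fun g => g.2)).sum
  if total ≤ K then total else -1

-- ===== PRECONDITION & SPEC =====
-- Pre_solve restricts to the task's natural domain: node costs for all N nodes
-- (N ≤ len(A); with fewer costs A raises IndexError) and edges between valid
-- node ids 1..N (A raises IndexError for ids beyond the arrays, and treats ids
-- ≤ 0 via Python's wraparound / the unused node 0 — outside the natural domain).
def Pre_solve (N : Int) (K : Int) (A : List Int) (friends : List (Int × Int)) : Prop :=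
  N ≤ (A.length : Int) ∧ ∀ e ∈ friends, 1 ≤ e.1 ∧ e.1 ≤ N ∧ 1 ≤ e.2 ∧ e.2 ≤ N
instance (N : Int) (K : Int) (A : List Int) (friends : List (Int × Int)) : Decidable (Pre_solve N K A friends) := by unfold Pre_solve; infer_instance

def pvWitness_solve : Int × Int × List Int × (List (Int × Int)) := (3, 10, [2, 5, 4], [(1, 2), (2, 1), (3, 3)])

def Spec_solve (N : Int) (K : Int) (A : List Int) (friends : List (Int × Int)) (out : Int) : Prop := out = solve_alt N K A friends
instance (N : Int) (K : Int) (A : List Int) (friends : List (Int × Int)) (out : Int) : Decidable (Spec_solve N K A friends out) := by unfold Spec_solve; infer_instance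

-- ===== CLAIM (what is proved, stated in full; the proofs are below) =====
def Claim_equal_solve : Prop := ∀ (N : Int) (K : Int) (A : List Int) (friends : List (Int × Int)), Dom_solve N K A friends → Pre_solve N K A friends → Spec_solve N K A friends (solve N K A friends)

-- ===== LEMMAS AND PROOFS =====


-- basic facts about the Python-array read/write helpers

theorem pvGetA_eq_getElem (xs : List Int) (i : Int) (h0 : 0 ≤ i) (h : i.toNat < xs.length) :
    pvGetA xs i = xs[i.toNat] := by
  simp [pvGetA, PySem.List.pyGet?_of_nonneg _ h0, List.getElem?_eq_getElem h]

theorem pvSetA_length (xs : List Int) (i v : Int) : (pvSetA xs i v).length = xs.length := by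
  simp [pvSetA]

theorem pvGetA_pvSetA_self (xs : List Int) (i v : Int) (h0 : 0 ≤ i) (h : i.toNat < xs.length) :
    pvGetA (pvSetA xs i v) i = v := by
  rw [pvGetA_eq_getElem _ _ h0 (by simpa [pvSetA] using h)]
  simp [pvSetA, List.getElem_set_self]

theorem pvGetA_pvSetA_other (xs : List Int) (i j v : Int) (h0 : 0 ≤ i) (hj : 0 ≤ j)
    (hne : j ≠ i) : pvGetA (pvSetA xs i v) j = pvGetA xs j := by
  have hne' : j.toNat ≠ i.toNat := by omega
  simp [pvGetA, pvSetA, PySem.List.pyGet?_of_nonneg _ hj, List.getElem?_set_ne (Ne.symm hne')]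

-- the parent-chasing structure of A's forest

def IsRootL (roots : List Int) (x : Int) : Prop := pvGetA roots x = x

def iterP (roots : List Int) : Nat → Int → Int
  | 0, x => x
  | k+1, x => iterP roots k (pvGetA roots x)

def ReachL (roots : List Int) (x r : Int) : Prop :=
  (∃ k, iterP roots k x = r) ∧ IsRootL roots r

theorem iterP_fix (roots : List Int) (r : Int) (h : IsRootL roots r) :
    ∀ k, iterP roots k r = r := by
  intro k; induction k with
  | zero => rfl
  | succ k ih =>
    show iterP roots k (pvGetA roots r) = r
    rw [h]; exact ih

theorem iterP_add (roots : List Int) (m n : Nat) (x : Int) :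
    iterP roots (m + n) x = iterP roots n (iterP roots m x) := by
  induction m generalizing x with
  | zero => simp [iterP]
  | succ m ih =>
    have : m + 1 + n = (m + n) + 1 := by omega
    rw [this]
    simpa [iterP] using ih (pvGetA roots x)

theorem reach_unique (roots : List Int) (x r r' : Int)
    (h1 : ReachL roots x r) (h2 : ReachL roots x r') : r = r' := by
  obtain ⟨⟨k, hk⟩, hr⟩ := h1
  obtain ⟨⟨k', hk'⟩, hr'⟩ := h2
  rcases Nat.le_total k k' with h | h
  · have : iterP roots (k + (k' - k)) x = r' := by rwa [Nat.add_sub_cancel' h]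
    rw [iterP_add, hk, iterP_fix _ _ hr] at this
    exact this
  · have : iterP roots (k' + (k - k')) x = r := by rwa [Nat.add_sub_cancel' h]
    rw [iterP_add, hk', iterP_fix _ _ hr'] at this
    exact this.symm

theorem reach_refl (roots : List Int) (r : Int) (h : IsRootL roots r) : ReachL roots r r :=
  ⟨⟨0, rfl⟩, h⟩

theorem reach_root (roots : List Int) (x r : Int) (hx : IsRootL roots x)
    (h : ReachL roots x r) : r = x :=
  (reach_unique roots x r x h (reach_refl roots x hx))

theorem reach_step (roots : List Int) (x y r : Int) (h : pvGetA roots x = y)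
    (hr : ReachL roots y r) : ReachL roots x r := by
  obtain ⟨⟨k, hk⟩, hroot⟩ := hr
  exact ⟨⟨k + 1, by simpa [iterP, h, Nat.add_comm] using hk⟩, hroot⟩

-- the one workhorse: reachability is preserved by any update that agrees off a
-- set S of redirected nodes, provided every S-node reaches the new target
theorem reach_master (roots roots' : List Int) (P S : Int → Prop) (r r' : Int)
    (hcl : ∀ y, P y → P (pvGetA roots y))
    (hS : ∀ y, P y → S y → ReachL roots' y r')
    (hF : ∀ y, P y → ¬ S y → pvGetA roots' y = pvGetA roots y)
    (hr : S r) :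
    ∀ x, P x → ReachL roots x r → ReachL roots' x r' := by
  have key : ∀ k x, P x → iterP roots k x = r → ReachL roots' x r' := by
    intro k
    induction k with
    | zero =>
      intro x hP hx
      have : x = r := hx
      exact hS x hP (this ▸ hr)
    | succ k ih =>
      intro x hP hx
      by_cases hSx : S x
      · exact hS x hP hSx
      · have hstep : iterP roots k (pvGetA roots x) = r := hx
        exact reach_step _ _ _ _ (hF x hP hSx) (ih (pvGetA roots x) (hcl x hP) hstep)
  rintro x hP ⟨⟨k, hk⟩, -⟩
  exact key k x hP hk

-- explicit parent chains (the list find_root pushes on its stack)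

inductive ChainL (roots : List Int) : Int → List Int → Int → Prop
  | nil (r : Int) : IsRootL roots r → ChainL roots r [] r
  | cons (x : Int) (cs : List Int) (r : Int) : pvGetA roots x ≠ x →
      ChainL roots (pvGetA roots x) cs r → ChainL roots x (x :: cs) r

theorem chain_root (roots : List Int) (x : Int) (C : List Int) (r : Int)
    (h : ChainL roots x C r) : IsRootL roots r := by
  induction h with
  | nil _ h => exact h
  | cons _ _ _ _ _ ih => exact ih

theorem chain_exists (roots : List Int) (x r : Int) (h : ReachL roots x r) :
    ∃ C, ChainL roots x C r := by
  obtain ⟨⟨k, hk⟩, hroot⟩ := h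
  induction k generalizing x with
  | zero => exact ⟨[], hk ▸ ChainL.nil r hroot⟩
  | succ k ih =>
    by_cases hx : pvGetA roots x = x
    · have hxr : x = r := by
        have h2 := iterP_fix roots x hx (k+1)
        rw [hk] at h2; exact h2.symm
      subst hxr
      exact ⟨[], ChainL.nil x hx⟩
    · obtain ⟨C, hC⟩ := ih (pvGetA roots x) hk
      exact ⟨x :: C, ChainL.cons x C r hx hC⟩

theorem chain_suffix (roots : List Int) (x : Int) (C : List Int) (r : Int)
    (h : ChainL roots x C r) :
    ∀ pre y suf, C = pre ++ y :: suf → ChainL roots y (y :: suf) r := by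
  induction h with
  | nil r h => intro pre y suf habs; simp at habs
  | cons x cs r hne hch ih =>
    intro pre y suf heq
    cases pre with
    | nil =>
      simp at heq
      obtain ⟨h1, h2⟩ := heq
      subst h1; subst h2
      exact ChainL.cons x cs r hne hch
    | cons p ps =>
      simp at heq
      exact ih ps y suf heq.2

theorem chain_unique (roots : List Int) (x : Int) (C C' : List Int) (r r' : Int)
    (h : ChainL roots x C r) (h' : ChainL roots x C' r') : C = C' ∧ r = r' := by
  induction h generalizing C' with
  | nil r hroot =>
    cases h' with
    | nil _ _ => exact ⟨rfl, rfl⟩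
    | cons _ _ _ hne _ => exact absurd hroot hne
  | cons x cs r hne hch ih =>
    cases h' with
    | nil _ hroot => exact absurd hroot hne
    | cons _ cs' _ hne' hch' =>
      obtain ⟨h1, h2⟩ := ih cs' hch'
      exact ⟨by rw [h1], h2⟩

theorem chain_nodup (roots : List Int) (x : Int) (C : List Int) (r : Int)
    (h : ChainL roots x C r) : C.Nodup := by
  induction h with
  | nil r _ => exact List.nodup_nil
  | cons x cs r hne hch ih =>
    refine List.nodup_cons.2 ⟨?_, ih⟩
    intro hmem
    obtain ⟨pre, suf, hdec⟩ := List.append_of_mem hmem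
    have hfull : ChainL roots x (x :: cs) r := ChainL.cons x cs r hne hch
    have hsuf : ChainL roots x (x :: suf) r :=
      chain_suffix roots x (x :: cs) r hfull (x :: pre) x suf (by simp [hdec])
    obtain ⟨heq, -⟩ := chain_unique roots x _ _ _ _ hfull hsuf
    have : cs.length = suf.length := by simpa using congrArg List.length heq
    have : cs.length = pre.length + 1 + suf.length := by
      rw [hdec]; simp; omega
    omega

theorem chain_notmem_root (roots : List Int) (x : Int) (C : List Int) (r : Int)
    (h : ChainL roots x C r) : r ∉ C := by
  induction h with
  | nil r _ => simp
  | cons x cs r hne hch ih =>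
    have hroot : IsRootL roots r := chain_root _ _ _ _ hch
    simp only [List.mem_cons, not_or]
    refine ⟨fun habs => hne ?_, ih⟩
    subst habs
    exact hroot

theorem chain_sub (roots : List Int) (P : Int → Prop)
    (hcl : ∀ y, P y → P (pvGetA roots y)) (x : Int) (C : List Int) (r : Int)
    (h : ChainL roots x C r) (hx : P x) : (∀ y ∈ C, P y) ∧ P r := by
  induction h with
  | nil r _ => exact ⟨by simp, hx⟩
  | cons x cs r hne hch ih =>
    obtain ⟨h1, h2⟩ := ih (hcl x hx)
    exact ⟨by simpa using ⟨hx, h1⟩, h2⟩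


-- the chase loop of find_root walks exactly the parent chain
theorem findLoopA_chain (roots costs : List Int) (x : Int) (C : List Int) (r : Int)
    (h : ChainL roots x C r) :
    ∀ fuel stack mc, C.length ≤ fuel →
      findLoopA roots costs fuel x stack mc =
        (stack ++ C, C.foldl (fun m y => min m (pvGetA costs y)) mc, r) := by
  induction h with
  | nil r hroot =>
    intro fuel stack mc _
    cases fuel with
    | zero => simp [findLoopA]
    | succ fuel => simp [findLoopA, show pvGetA roots r = r from hroot]
  | cons x cs r hne hch ih =>
    intro fuel stack mc hlen
    cases fuel with
    | zero => simp at hlen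
    | succ fuel =>
      simp only [findLoopA, if_neg hne]
      rw [ih fuel (stack ++ [x]) (min mc (pvGetA costs x)) (by simpa using Nat.lt_succ_iff.1 (by simpa using hlen))]
      simp [List.foldl_cons]

-- the compression loop, characterised pointwise
theorem compress_spec (r mc : Int) (C : List Int) :
    ∀ roots costs : List Int, C.Nodup →
    (∀ x ∈ C, 0 ≤ x ∧ x.toNat < roots.length ∧ x.toNat < costs.length) →
    (C.foldl (fun (p : List Int × List Int) k => (pvSetA p.1 k r, pvSetA p.2 k mc)) (roots, costs)).1.length = roots.length ∧
    (C.foldl (fun (p : List Int × List Int) k => (pvSetA p.1 k r, pvSetA p.2 k mc)) (roots, costs)).2.length = costs.length ∧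
    (∀ y : Int, 0 ≤ y →
      pvGetA (C.foldl (fun (p : List Int × List Int) k => (pvSetA p.1 k r, pvSetA p.2 k mc)) (roots, costs)).1 y
        = if y ∈ C then r else pvGetA roots y) ∧
    (∀ y : Int, 0 ≤ y →
      pvGetA (C.foldl (fun (p : List Int × List Int) k => (pvSetA p.1 k r, pvSetA p.2 k mc)) (roots, costs)).2 y
        = if y ∈ C then mc else pvGetA costs y) := by
  induction C with
  | nil => intro roots costs _ _; simp
  | cons x cs ih =>
    intro roots costs hnd hrange
    obtain ⟨hx0, hxr, hxc⟩ := hrange x (by simp)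
    have hnd' := List.nodup_cons.1 hnd
    have hstep : ∀ z ∈ cs, 0 ≤ z ∧ z.toNat < (pvSetA roots x r).length ∧ z.toNat < (pvSetA costs x mc).length := by
      intro z hz
      obtain ⟨h1, h2, h3⟩ := hrange z (by simp [hz])
      exact ⟨h1, by simpa [pvSetA_length] using h2, by simpa [pvSetA_length] using h3⟩
    obtain ⟨l1, l2, g1, g2⟩ := ih (pvSetA roots x r) (pvSetA costs x mc) hnd'.2 hstep
    simp only [List.foldl_cons]
    refine ⟨by rw [l1, pvSetA_length], by rw [l2, pvSetA_length], ?_, ?_⟩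
    · intro y hy
      rw [g1 y hy]
      by_cases hyc : y ∈ cs
      · simp [hyc]
      · by_cases hyx : y = x
        · subst hyx
          simp [hyc, pvGetA_pvSetA_self roots y r hy hxr]
        · simp [hyc, hyx, pvGetA_pvSetA_other roots x y r hx0 hy hyx]
    · intro y hy
      rw [g2 y hy]
      by_cases hyc : y ∈ cs
      · simp [hyc]
      · by_cases hyx : y = x
        · subst hyx
          simp [hyc, pvGetA_pvSetA_self costs y mc hy hxc]
        · simp [hyc, hyx, pvGetA_pvSetA_other costs x y mc hx0 hy hyx]

-- size bound: a nodup list of in-range indices is no longer than the array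
theorem nodup_length_le (C : List Int) (n : Nat) (hnd : C.Nodup)
    (hrange : ∀ x ∈ C, 0 ≤ x ∧ x.toNat < n) : C.length ≤ n := by
  classical
  have hmap : (C.map Int.toNat).Nodup := by
    refine List.Nodup.map_on ?_ hnd
    intro a ha b hb hab
    have := (hrange a ha).1
    have := (hrange b hb).1
    omega
  have hsub : (C.map Int.toNat) ⊆ List.range n := by
    intro z hz
    obtain ⟨w, hw, rfl⟩ := List.mem_map.1 hz
    exact List.mem_range.2 (hrange w hw).2
  have := (List.Nodup.subperm hmap hsub).length_le
  simpa using this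

-- full characterisation of A's find_root on a well-formed group
theorem findRoot_spec (roots costs : List Int) (Gm : List Int) (Gc : Int) (a r0 : Int)
    (hsub : ∀ x ∈ Gm, 0 ≤ x ∧ x.toNat < roots.length ∧ x.toNat < costs.length)
    (hclG : ∀ x ∈ Gm, pvGetA roots x ∈ Gm)
    (hr0 : r0 ∈ Gm) (hroot0 : IsRootL roots r0) (hc0 : pvGetA costs r0 = Gc)
    (hreach0 : ∀ x ∈ Gm, ReachL roots x r0)
    (ha : a ∈ Gm) :
    (findRootA roots costs a).2.1 = r0 ∧
    (findRootA roots costs a).2.2 = Gc ∧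
    (findRootA roots costs a).1.1.length = roots.length ∧
    (findRootA roots costs a).1.2.length = costs.length ∧
    (∀ y : Int, 0 ≤ y → y ∉ Gm →
      pvGetA (findRootA roots costs a).1.1 y = pvGetA roots y ∧
      pvGetA (findRootA roots costs a).1.2 y = pvGetA costs y) ∧
    IsRootL (findRootA roots costs a).1.1 r0 ∧
    pvGetA (findRootA roots costs a).1.2 r0 = Gc ∧
    (∀ x ∈ Gm, ReachL (findRootA roots costs a).1.1 x r0) ∧
    (∀ x ∈ Gm, pvGetA (findRootA roots costs a).1.1 x ∈ Gm) := by
  by_cases hfast : pvGetA roots a = a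
  · have hra : r0 = a := reach_root roots a r0 hfast (hreach0 a ha)
    subst hra
    refine ⟨?_, ?_, ?_, ?_, ?_, ?_, ?_, ?_, ?_⟩ <;>
      simp only [findRootA, if_pos hfast] <;>
      first
        | exact hfast
        | exact hc0
        | rfl
        | exact fun y _ _ => ⟨rfl, rfl⟩
        | exact fun y _ _ => ⟨trivial, trivial⟩
        | exact hroot0
        | exact hreach0
        | exact hclG
  · obtain ⟨C, hC⟩ := chain_exists roots a r0 (hreach0 a ha)
    have hCsub : (∀ y ∈ C, y ∈ Gm) ∧ r0 ∈ Gm := chain_sub roots (· ∈ Gm) hclG a C r0 hC ha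
    have hCnd : C.Nodup := chain_nodup _ _ _ _ hC
    have hCr : r0 ∉ C := chain_notmem_root _ _ _ _ hC
    have hClen : C.length ≤ roots.length := by
      refine nodup_length_le C roots.length hCnd ?_
      intro x hx
      obtain ⟨h1, h2, _⟩ := hsub x (hCsub.1 x hx)
      exact ⟨h1, h2⟩
    have hloop := findLoopA_chain roots costs a C r0 hC (roots.length + 1) [] 10000 (by omega)
    have hcomp := compress_spec r0 (min (C.foldl (fun m y => min m (pvGetA costs y)) 10000) (pvGetA costs r0)) C roots costs hCnd
      (fun x hx => hsub x (hCsub.1 x hx))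
    simp only [findRootA, if_neg hfast, hloop, List.nil_append]
    obtain ⟨hl1, hl2, hg1, hg2⟩ := hcomp
    obtain ⟨hr00, _, _⟩ := hsub r0 hr0
    -- name the compressed state
    set mcv := min (C.foldl (fun m y => min m (pvGetA costs y)) 10000) (pvGetA costs r0) with hmcv
    set rc := C.foldl (fun (p : List Int × List Int) k => (pvSetA p.1 k r0, pvSetA p.2 k mcv)) (roots, costs) with hrc
    have hget_r : pvGetA rc.1 r0 = r0 := by rw [hg1 r0 hr00, if_neg hCr]; exact hroot0
    have hgetc_r : pvGetA rc.2 r0 = Gc := by rw [hg2 r0 hr00, if_neg hCr]; exact hc0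
    have hrootrc : IsRootL rc.1 r0 := hget_r
    have hreach' : ∀ x ∈ Gm, ReachL rc.1 x r0 := by
      intro x hx
      refine reach_master roots rc.1 (· ∈ Gm) (fun y => y ∈ C ∨ y = r0) r0 r0 hclG ?_ ?_ (Or.inr rfl) x hx (hreach0 x hx)
      · intro y hyG hyS
        rcases hyS with hyC | hyr
        · have hy0 := (hsub y hyG).1
          refine reach_step rc.1 y r0 r0 ?_ (reach_refl _ _ hrootrc)
          rw [hg1 y hy0]; simp [hyC]
        · subst hyr; exact reach_refl _ _ hrootrc
      · intro y hyG hyS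
        have hy0 := (hsub y hyG).1
        rw [hg1 y hy0]
        simp only [not_or] at hyS
        simp [hyS.1]
    have hclosed' : ∀ x ∈ Gm, pvGetA rc.1 x ∈ Gm := by
      intro x hx
      have hx0 := (hsub x hx).1
      rw [hg1 x hx0]
      by_cases hxC : x ∈ C
      · simp [hxC, hr0]
      · simp [hxC, hclG x hx]
    refine ⟨hget_r, hgetc_r, by simpa using hl1, by simpa using hl2, ?_, hrootrc, hgetc_r, hreach', hclosed'⟩
    intro y hy0 hyG
    have hyC : y ∉ C := fun hyc => hyG (hCsub.1 y hyc)
    constructor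
    · rw [hg1 y hy0]; simp [hyC]
    · rw [hg2 y hy0]; simp [hyC]

-- a group untouched by an update keeps its root, cost and reachability
theorem group_frame (roots costs roots' costs' : List Int) (Hm : List Int) (Hc r : Int)
    (hagree : ∀ y ∈ Hm, pvGetA roots' y = pvGetA roots y ∧ pvGetA costs' y = pvGetA costs y)
    (hcl : ∀ x ∈ Hm, pvGetA roots x ∈ Hm)
    (hr : r ∈ Hm) (hroot : IsRootL roots r) (hcost : pvGetA costs r = Hc)
    (hreach : ∀ x ∈ Hm, ReachL roots x r) :
    (∀ x ∈ Hm, pvGetA roots' x ∈ Hm) ∧ IsRootL roots' r ∧ pvGetA costs' r = Hc ∧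
      ∀ x ∈ Hm, ReachL roots' x r := by
  have hroot' : IsRootL roots' r := by
    show pvGetA roots' r = r
    rw [(hagree r hr).1]; exact hroot
  refine ⟨?_, hroot', by rw [(hagree r hr).2]; exact hcost, ?_⟩
  · intro x hx; rw [(hagree x hx).1]; exact hcl x hx
  · intro x hx
    refine reach_master roots roots' (· ∈ Hm) (· = r) r r hcl ?_ ?_ rfl x hx (hreach x hx)
    · intro y _ hy; subst hy; exact reach_refl _ _ hroot'
    · intro y hyH _; exact (hagree y hyH).1


-- the simulation invariant between A's (roots, costs) arrays and B's groups

structure InvS (N : Int) (roots costs : List Int) (groups : List (List Int × Int)) : Prop where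
  hrl : roots.length = (N+1).toNat
  hcll : (N+1).toNat ≤ costs.length
  hperm : (groups.map (fun g => g.1)).flatten.Perm (PySem.List.pyRange 1 (N+1) 1)
  hcorr : ∀ g ∈ groups, ∃ r, r ∈ g.1 ∧ IsRootL roots r ∧ pvGetA costs r = g.2 ∧
      ∀ x ∈ g.1, ReachL roots x r
  hclosed : ∀ g ∈ groups, ∀ x ∈ g.1, pvGetA roots x ∈ g.1

theorem inv_bound {N : Int} {groups : List (List Int × Int)}
    (hperm : (groups.map (fun g => g.1)).flatten.Perm (PySem.List.pyRange 1 (N+1) 1))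
    {g : List Int × Int} (hg : g ∈ groups) {x : Int} (hx : x ∈ g.1) : 1 ≤ x ∧ x ≤ N := by
  have hmem : x ∈ (groups.map (fun g => g.1)).flatten :=
    List.mem_flatten.2 ⟨g.1, List.mem_map_of_mem hg, hx⟩
  have := (hperm.mem_iff).1 hmem
  have := (PySem.List.mem_pyRange_one).1 this
  omega

theorem inv_range {N : Int} {roots costs : List Int} {groups : List (List Int × Int)}
    (hI : InvS N roots costs groups) {g : List Int × Int} (hg : g ∈ groups) :
    ∀ x ∈ g.1, 0 ≤ x ∧ x.toNat < roots.length ∧ x.toNat < costs.length := by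
  intro x hx
  have hb := inv_bound hI.hperm hg hx
  have h1 := hI.hrl
  have h2 := hI.hcll
  omega

-- two groups sharing a member are the same group (the flattened member lists
-- carry no duplicates)
theorem mem_overlap (groups : List (List Int × Int))
    (hnd : (groups.map (fun g => g.1)).flatten.Nodup) :
    ∀ g ∈ groups, ∀ h ∈ groups, ∀ y, y ∈ g.1 → y ∈ h.1 → g = h := by
  induction groups with
  | nil => intro g hg; simp at hg
  | cons g0 rest ih =>
    simp only [List.map_cons, List.flatten_cons, List.nodup_append] at hnd
    obtain ⟨h1, h2, h3⟩ := hnd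
    intro g hg h hh y hyg hyh
    rcases List.mem_cons.1 hg with rfl | hg' <;> rcases List.mem_cons.1 hh with rfl | hh'
    · rfl
    · exact (h3 y hyg y (List.mem_flatten.2 ⟨h.1, List.mem_map_of_mem hh', hyh⟩) rfl).elim
    · exact (h3 y hyh y (List.mem_flatten.2 ⟨g.1, List.mem_map_of_mem hg', hyg⟩) rfl).elim
    · exact ih h2 g hg' h hh' y hyg hyh

-- cross-segment disjointness from the flattened no-duplicate property
theorem flat_disj (X Y : List (List Int × Int))
    (hnd : (((X ++ Y)).map (fun g => g.1)).flatten.Nodup) :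
    ∀ g ∈ X, ∀ h ∈ Y, ∀ y, y ∈ g.1 → y ∈ h.1 → False := by
  rw [List.map_append, List.flatten_append, List.nodup_append] at hnd
  intro g hg h hh y hyg hyh
  have m1 : y ∈ (X.map (fun g => g.1)).flatten := List.mem_flatten.2 ⟨g.1, List.mem_map_of_mem hg, hyg⟩
  have m2 : y ∈ (Y.map (fun g => g.1)).flatten := List.mem_flatten.2 ⟨h.1, List.mem_map_of_mem hh, hyh⟩
  exact hnd.2.2 y m1 y m2 rfl

-- find the (unique) group of a node through B's findIdx?
theorem find_group (groups : List (List Int × Int)) (x : Int)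
    (hx : ∃ g ∈ groups, x ∈ g.1) :
    ∃ i : Nat, groups.findIdx? (fun g => g.1.contains x) = some i ∧ i < groups.length ∧
      x ∈ (groups.getD i ([], 0)).1 ∧ ∀ j : Nat, j < i → x ∉ (groups.getD j ([], 0)).1 := by
  obtain ⟨g, hg, hxg⟩ := hx
  have hany : groups.any (fun g => g.1.contains x) = true :=
    List.any_eq_true.2 ⟨g, hg, by simpa using hxg⟩
  have hsome : (groups.findIdx? (fun g => g.1.contains x)).isSome := by
    rw [List.findIdx?_isSome]; exact hany
  obtain ⟨i, hi⟩ := Option.isSome_iff_exists.1 hsome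
  rw [List.findIdx?_eq_some_iff_findIdx_eq] at hi
  obtain ⟨hilen, hidx⟩ := hi
  refine ⟨i, ?_, hilen, ?_, ?_⟩
  · rw [List.findIdx?_eq_some_iff_findIdx_eq]; exact ⟨hilen, hidx⟩
  · have hw : List.findIdx (fun (g : List Int × Int) => g.1.contains x) groups < groups.length := by
      rw [hidx]; exact hilen
    have h5 := List.findIdx_getElem (w := hw)
    rw [List.getD_eq_getElem groups ([], 0) hilen]
    have h6 : groups[List.findIdx (fun (g : List Int × Int) => g.1.contains x) groups] = groups[i] := by
      congr 1
    rw [h6] at h5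
    simpa using h5
  · intro j hj
    have hjlt : j < List.findIdx (fun (g : List Int × Int) => g.1.contains x) groups := by
      rw [hidx]; exact hj
    have h5 := List.not_of_lt_findIdx hjlt
    rw [List.getD_eq_getElem groups ([], 0) (by omega)]
    simp only [Bool.eq_false_iff] at h5
    intro habs
    exact h5 (by simpa using habs)

-- positional split of a list at two distinct indices
theorem split_two {α : Type} (l : List α) (i j : Nat) (hij : i < j) (hj : j < l.length) :
    ∃ l1 l2 l3, l = l1 ++ l[i] :: l2 ++ l[j] :: l3 ∧ l1.length = i ∧ l2.length = j - i - 1 := by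
  refine ⟨l.take i, (l.drop (i+1)).take (j - i - 1), l.drop (j+1), ?_, by simp; omega, by simp; omega⟩
  have e4 : (l.drop (i+1)).drop (j - i - 1) = l.drop j := by
    rw [List.drop_drop]; congr 1; omega
  have e6 : l[j] :: l.drop (j+1) = (l.drop (i+1)).drop (j - i - 1) := by
    rw [e4]; exact (List.drop_eq_getElem_cons (by omega)).symm
  have e7 : (l.drop (i+1)).take (j - i - 1) ++ l[j] :: l.drop (j+1) = l.drop (i+1) := by
    rw [e6]; exact List.take_append_drop _ _
  have e8 : l[i] :: ((l.drop (i+1)).take (j - i - 1) ++ l[j] :: l.drop (j+1)) = l.drop i := by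
    rw [e7]; exact (List.drop_eq_getElem_cons (by omega)).symm
  calc l = l.take i ++ l.drop i := (List.take_append_drop i l).symm
    _ = l.take i ++ (l[i] :: ((l.drop (i+1)).take (j - i - 1) ++ l[j] :: l.drop (j+1))) := by
          rw [e8]
    _ = _ := by simp

-- the enumerate/filterMap comprehension of B keeps a segment whose indices
-- avoid both removed positions
theorem enumFilter_keep {α : Type} (ia ib : Int) :
    ∀ (l : List α) (s : Int), (∀ k : Int, s ≤ k → k < s + l.length → k ≠ ia ∧ k ≠ ib) →
    (PySem.List.enumerate l s).filterMap
      (fun p => if p.1 = ia ∨ p.1 = ib then none else some p.2) = l := by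
  intro l
  induction l with
  | nil => intro s _; simp [PySem.List.enumerate_nil]
  | cons x xs ih =>
    intro s h
    have hs := h s (le_refl s) (by push_cast [List.length_cons, List.length_nil]; omega)
    have hcond : ¬(s = ia ∨ s = ib) := by rintro (rfl | rfl) <;> simp_all
    rw [PySem.List.enumerate_cons, List.filterMap_cons]
    rw [if_neg hcond]
    rw [ih (s+1) (fun k hk1 hk2 => h k (by omega) (by push_cast [List.length_cons, List.length_nil] at hk2 ⊢; omega))]

theorem enumFilter_drop_single {α : Type} (ia ib : Int) (u : α) (s : Int) (hs : s = ia ∨ s = ib) :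
    (PySem.List.enumerate [u] s).filterMap
      (fun p => if p.1 = ia ∨ p.1 = ib then none else some p.2) = [] := by
  rw [PySem.List.enumerate_cons, PySem.List.enumerate_nil]
  simp [hs]

theorem enumFilter_two {α : Type} (ia ib : Int) (l1 : List α) (u : α) (l2 : List α) (v : α)
    (l3 : List α)
    (hiff : ∀ k : Int, (k = ia ∨ k = ib) ↔ (k = (l1.length : Int) ∨ k = (l1.length + 1 + l2.length : Int))) :
    (PySem.List.enumerate (l1 ++ u :: l2 ++ v :: l3) 0).filterMap
      (fun p => if p.1 = ia ∨ p.1 = ib then none else some p.2) = l1 ++ l2 ++ l3 := by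
  have hrw : l1 ++ u :: l2 ++ v :: l3 = l1 ++ ([u] ++ (l2 ++ ([v] ++ l3))) := by simp
  rw [hrw]
  rw [PySem.List.enumerate_append, PySem.List.enumerate_append, PySem.List.enumerate_append,
    PySem.List.enumerate_append]
  rw [List.filterMap_append, List.filterMap_append, List.filterMap_append, List.filterMap_append]
  rw [enumFilter_keep ia ib l1 0 ?k1]
  rw [enumFilter_keep ia ib l2 _ ?k2]
  rw [enumFilter_keep ia ib l3 _ ?k3]
  rw [enumFilter_drop_single ia ib u _ (by refine (hiff _).2 (Or.inl ?_); push_cast; omega)]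
  rw [enumFilter_drop_single ia ib v _ (by refine (hiff _).2 (Or.inr ?_); push_cast [List.length_cons, List.length_nil]; omega)]
  · simp
  case k1 =>
    intro k h1 h2
    constructor <;> rintro rfl <;>
      [rcases (hiff k).1 (Or.inl rfl) with h | h; rcases (hiff k).1 (Or.inr rfl) with h | h] <;>
      push_cast [List.length_cons, List.length_nil] at h h1 h2 ⊢ <;> omega
  case k2 =>
    intro k h1 h2
    constructor <;> rintro rfl <;>
      [rcases (hiff k).1 (Or.inl rfl) with h | h; rcases (hiff k).1 (Or.inr rfl) with h | h] <;>
      push_cast [List.length_cons, List.length_nil] at h h1 h2 ⊢ <;> omega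
  case k3 =>
    intro k h1 h2
    constructor <;> rintro rfl <;>
      [rcases (hiff k).1 (Or.inl rfl) with h | h; rcases (hiff k).1 (Or.inr rfl) with h | h] <;>
      push_cast [List.length_cons, List.length_nil] at h h1 h2 ⊢ <;> omega

-- invariant restoration after the two-group merge writes
theorem merged_inv (N : Int) (roots2 costs2 : List Int)
    (l1 l2 l3 : List (List Int × Int)) (u v Ga Gb : List Int × Int)
    (a b ra rb : Int)
    (hsplit : (u = Ga ∧ v = Gb) ∨ (u = Gb ∧ v = Ga))
    (hrl2 : roots2.length = (N+1).toNat) (hcll2 : (N+1).toNat ≤ costs2.length)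
    (hpermD : ((l1 ++ u :: l2 ++ v :: l3).map (fun g => g.1)).flatten.Perm
      (PySem.List.pyRange 1 (N+1) 1))
    (haGa : a ∈ Ga.1) (hbGb : b ∈ Gb.1) (hraGa : ra ∈ Ga.1) (hrbGb : rb ∈ Gb.1)
    (hrootA : IsRootL roots2 ra) (hcostA : pvGetA costs2 ra = Ga.2)
    (hreachA : ∀ x ∈ Ga.1, ReachL roots2 x ra) (hclosedA : ∀ x ∈ Ga.1, pvGetA roots2 x ∈ Ga.1)
    (hrootB : IsRootL roots2 rb) (hcostB : pvGetA costs2 rb = Gb.2)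
    (hreachB : ∀ x ∈ Gb.1, ReachL roots2 x rb) (hclosedB : ∀ x ∈ Gb.1, pvGetA roots2 x ∈ Gb.1)
    (hrest : ∀ g ∈ l1 ++ l2 ++ l3, (∀ y ∈ g.1, ¬(y ∈ Ga.1 ∨ y ∈ Gb.1)) →
      (∃ r, r ∈ g.1 ∧ IsRootL roots2 r ∧ pvGetA costs2 r = g.2 ∧
        ∀ x ∈ g.1, ReachL roots2 x r) ∧ ∀ x ∈ g.1, pvGetA roots2 x ∈ g.1) :
    InvS N (pvSetA (pvSetA roots2 b a) rb a) (pvSetA costs2 ra (min Ga.2 Gb.2))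
      ((l1 ++ l2 ++ l3) ++ [(Ga.1 ++ Gb.1, min Ga.2 Gb.2)]) := by
  have hndD : ((l1 ++ u :: l2 ++ v :: l3).map (fun g => g.1)).flatten.Nodup :=
    hpermD.nodup_iff.2 (PySem.List.nodup_pyRange_one 1 (N+1))
  -- bounds of all members of the decomposed groups
  have hbnd : ∀ g ∈ l1 ++ u :: l2 ++ v :: l3, ∀ x ∈ g.1, 1 ≤ x ∧ x ≤ N := by
    intro g hg x hx; exact inv_bound hpermD hg hx
  have huD : u ∈ l1 ++ u :: l2 ++ v :: l3 := by simp
  have hvD : v ∈ l1 ++ u :: l2 ++ v :: l3 := by simp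
  have hGaD : ∀ x ∈ Ga.1, 1 ≤ x ∧ x ≤ N := by
    rcases hsplit with ⟨rfl, rfl⟩ | ⟨rfl, rfl⟩
    · exact hbnd _ huD
    · exact hbnd _ hvD
  have hGbD : ∀ x ∈ Gb.1, 1 ≤ x ∧ x ≤ N := by
    rcases hsplit with ⟨rfl, rfl⟩ | ⟨rfl, rfl⟩
    · exact hbnd _ hvD
    · exact hbnd _ huD
  -- disjointness between the two merged groups, and of the rest from both
  have hdisjUV : ∀ y, y ∈ u.1 → y ∈ v.1 → False := by
    intro y h1 h2
    exact flat_disj (l1 ++ [u]) (l2 ++ v :: l3)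
      (by rw [show (l1 ++ [u]) ++ (l2 ++ v :: l3) = l1 ++ u :: l2 ++ v :: l3 by simp]; exact hndD)
      u (by simp) v (by simp) y h1 h2
  have hdisjAB : ∀ y, y ∈ Ga.1 → y ∈ Gb.1 → False := by
    rcases hsplit with ⟨rfl, rfl⟩ | ⟨rfl, rfl⟩
    · exact hdisjUV
    · exact fun y h1 h2 => hdisjUV y h2 h1
  have hrestDisj : ∀ g ∈ l1 ++ l2 ++ l3, ∀ y ∈ g.1, y ∈ u.1 ∨ y ∈ v.1 → False := by
    intro g hg y hy hyuv
    rcases List.mem_append.1 hg with hg12 | hg3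
    · rcases List.mem_append.1 hg12 with hg1 | hg2
      · rcases hyuv with hyu | hyv
        · exact flat_disj l1 (u :: l2 ++ v :: l3) (by simpa using hndD) g hg1 u (by simp) y hy hyu
        · exact flat_disj l1 (u :: l2 ++ v :: l3) (by simpa using hndD) g hg1 v (by simp) y hy hyv
      · rcases hyuv with hyu | hyv
        · exact flat_disj (l1 ++ [u]) (l2 ++ v :: l3)
            (by rw [show (l1 ++ [u]) ++ (l2 ++ v :: l3) = l1 ++ u :: l2 ++ v :: l3 by simp]; exact hndD)
            u (by simp) g (by simp [hg2]) y hyu hy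
        · exact flat_disj (l1 ++ u :: l2) (v :: l3)
            (by rw [show (l1 ++ u :: l2) ++ (v :: l3) = l1 ++ u :: l2 ++ v :: l3 by simp]; exact hndD)
            g (by simp [hg2]) v (by simp) y hy hyv
    · rcases hyuv with hyu | hyv
      · exact flat_disj (l1 ++ [u]) (l2 ++ v :: l3)
          (by rw [show (l1 ++ [u]) ++ (l2 ++ v :: l3) = l1 ++ u :: l2 ++ v :: l3 by simp]; exact hndD)
          u (by simp) g (by simp [hg3]) y hyu hy
      · exact flat_disj (l1 ++ u :: l2 ++ [v]) l3
          (by rw [show (l1 ++ u :: l2 ++ [v]) ++ l3 = l1 ++ u :: l2 ++ v :: l3 by simp]; exact hndD)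
          v (by simp) g hg3 y hyv hy
  have hrestAB : ∀ g ∈ l1 ++ l2 ++ l3, ∀ y ∈ g.1, (y ∈ Ga.1 ∨ y ∈ Gb.1) → False := by
    intro g hg y hy hyab
    rcases hsplit with ⟨rfl, rfl⟩ | ⟨rfl, rfl⟩
    · exact hrestDisj g hg y hy hyab
    · exact hrestDisj g hg y hy hyab.symm
  -- ranges for the written indices
  have hbR : 0 ≤ b ∧ b.toNat < roots2.length := by have := hGbD b hbGb; omega
  have hrbR : 0 ≤ rb ∧ rb.toNat < (pvSetA roots2 b a).length := by
    rw [pvSetA_length]; have := hGbD rb hrbGb; omega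
  have hraR : 0 ≤ ra ∧ ra.toNat < costs2.length := by have := hGaD ra hraGa; omega
  have hraNErb : ra ≠ rb := fun h => hdisjAB ra hraGa (h ▸ hrbGb)
  have hraNEb : ra ≠ b := fun h => hdisjAB ra hraGa (h ▸ hbGb)
  -- pointwise description of the written arrays
  set rW := pvSetA (pvSetA roots2 b a) rb a with hrWdef
  set cW := pvSetA costs2 ra (min Ga.2 Gb.2) with hcWdef
  have hgW : ∀ y : Int, 0 ≤ y →
      pvGetA rW y = if y = rb ∨ y = b then a else pvGetA roots2 y := by
    intro y hy
    by_cases h1 : y = rb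
    · subst h1
      rw [if_pos (Or.inl rfl : y = y ∨ y = b), hrWdef,
        pvGetA_pvSetA_self _ _ _ hrbR.1 hrbR.2]
    · rw [hrWdef, pvGetA_pvSetA_other _ _ _ _ hrbR.1 hy h1]
      by_cases h2 : y = b
      · subst h2
        rw [if_pos (Or.inr rfl : y = rb ∨ y = y), pvGetA_pvSetA_self _ _ _ hbR.1 hbR.2]
      · rw [pvGetA_pvSetA_other _ _ _ _ hbR.1 hy h2]
        simp [h1, h2]
  have hcW : ∀ y : Int, 0 ≤ y →
      pvGetA cW y = if y = ra then min Ga.2 Gb.2 else pvGetA costs2 y := by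
    intro y hy
    by_cases h1 : y = ra
    · subst h1
      rw [if_pos rfl, hcWdef, pvGetA_pvSetA_self _ _ _ hraR.1 hraR.2]
    · rw [hcWdef, pvGetA_pvSetA_other _ _ _ _ hraR.1 hy h1]; simp [h1]
  -- root of the merged component
  have hra0 : 0 ≤ ra := by have := hGaD ra hraGa; omega
  have hrootW : IsRootL rW ra := by
    show pvGetA rW ra = ra
    rw [hgW ra hra0, if_neg (by rintro (h | h); exacts [hraNErb h, hraNEb h])]
    exact hrootA
  have hreachWa : ∀ x ∈ Ga.1, ReachL rW x ra := by
    intro x hx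
    refine reach_master roots2 rW (· ∈ Ga.1) (· = ra) ra ra hclosedA ?_ ?_ rfl x hx (hreachA x hx)
    · intro y _ hy; subst hy; exact reach_refl _ _ hrootW
    · intro y hyG hyne
      rw [hgW y (by have := hGaD y hyG; omega)]
      rw [if_neg ?_]
      rintro (h | h)
      · exact hdisjAB y hyG (h ▸ hrbGb)
      · exact hdisjAB y hyG (h ▸ hbGb)
  have hreachWA : ReachL rW a ra := hreachWa a haGa
  have hreachWb : ∀ x ∈ Gb.1, ReachL rW x ra := by
    intro x hx
    refine reach_master roots2 rW (· ∈ Gb.1) (fun y => y = b ∨ y = rb) rb ra hclosedB ?_ ?_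
      (Or.inr rfl) x hx (hreachB x hx)
    · intro y _ hy
      refine reach_step rW y a ra ?_ hreachWA
      rw [hgW y ?_, if_pos (by tauto)]
      rcases hy with h | h
      · rw [h]; have := hGbD b hbGb; omega
      · rw [h]; have := hGbD rb hrbGb; omega
    · intro y hyG hyne
      rw [hgW y (by have := hGbD y hyG; omega)]
      rw [if_neg (by tauto)]
  -- frame for the untouched groups
  have hrestFrame : ∀ g ∈ l1 ++ l2 ++ l3, ∀ y ∈ g.1,
      pvGetA rW y = pvGetA roots2 y ∧ pvGetA cW y = pvGetA costs2 y := by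
    intro g hg y hy
    have hy0 : 0 ≤ y := by
      rcases List.mem_append.1 hg with h12 | h3
      · rcases List.mem_append.1 h12 with h1 | h2
        · have := hbnd g (by simp [h1]) y hy; omega
        · have := hbnd g (by simp [h2]) y hy; omega
      · have := hbnd g (by simp [h3]) y hy; omega
    constructor
    · rw [hgW y hy0, if_neg ?_]
      rintro (h | h)
      · exact hrestAB g hg y hy (Or.inr (h ▸ hrbGb))
      · exact hrestAB g hg y hy (Or.inr (h ▸ hbGb))
    · rw [hcW y hy0, if_neg ?_]
      intro h
      exact hrestAB g hg y hy (Or.inl (h ▸ hraGa))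
  refine ⟨?_, ?_, ?_, ?_, ?_⟩
  · rw [hrWdef, pvSetA_length, pvSetA_length]; exact hrl2
  · rw [hcWdef, pvSetA_length]; exact hcll2
  · -- permutation of the flattened member lists
    refine List.Perm.trans ?_ hpermD
    refine List.perm_iff_count.2 ?_
    intro x
    have hcnt : List.count x (Ga.1 ++ Gb.1) = List.count x (u.1 ++ v.1) := by
      rcases hsplit with ⟨rfl, rfl⟩ | ⟨rfl, rfl⟩
      · rfl
      · simp [List.count_append]; omega
    simp only [List.map_append, List.map_cons, List.flatten_append, List.flatten_cons,
      List.count_append, List.map_nil, List.flatten_nil] at hcnt ⊢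
    simp [List.count_append] at hcnt ⊢
    omega
  · -- per-group root/cost/reach data
    intro g hg
    rcases List.mem_append.1 hg with hgRest | hgNew
    · obtain ⟨⟨r, hrmem, hrroot, hrcost, hrreach⟩, hclo⟩ :=
        hrest g hgRest (fun y hy hor => hrestAB g hgRest y hy hor)
      obtain ⟨hclo', hroot', hcost', hreach'⟩ :=
        group_frame roots2 costs2 rW cW g.1 g.2 r (hrestFrame g hgRest) hclo hrmem hrroot hrcost hrreach
      exact ⟨r, hrmem, hroot', hcost', hreach'⟩
    · have hgm : g = (Ga.1 ++ Gb.1, min Ga.2 Gb.2) := by simpa using hgNew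
      subst hgm
      refine ⟨ra, List.mem_append.2 (Or.inl hraGa), hrootW, ?_, ?_⟩
      · rw [hcW ra hra0, if_pos rfl]
      · intro x hx
        rcases List.mem_append.1 hx with hxa | hxb
        · exact hreachWa x hxa
        · exact hreachWb x hxb
  · -- closure
    intro g hg
    rcases List.mem_append.1 hg with hgRest | hgNew
    · intro x hx
      rw [(hrestFrame g hgRest x hx).1]
      exact (hrest g hgRest (fun y hy hor => hrestAB g hgRest y hy hor)).2 x hx
    · have hgm : g = (Ga.1 ++ Gb.1, min Ga.2 Gb.2) := by simpa using hgNew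
      subst hgm
      intro x hx
      simp only at hx ⊢
      rcases List.mem_append.1 hx with hxa | hxb
      · have hx0 : 0 ≤ x := by have := hGaD x hxa; omega
        rw [hgW x hx0]
        by_cases hS : x = rb ∨ x = b
        · rw [if_pos hS]; exact List.mem_append.2 (Or.inl haGa)
        · rw [if_neg hS]; exact List.mem_append.2 (Or.inl (hclosedA x hxa))
      · have hx0 : 0 ≤ x := by have := hGbD x hxb; omega
        rw [hgW x hx0]
        by_cases hS : x = rb ∨ x = b
        · rw [if_pos hS]; exact List.mem_append.2 (Or.inl haGa)
        · rw [if_neg hS]; exact List.mem_append.2 (Or.inr (hclosedB x hxb))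

-- B's merge step really performs the two-group merge
theorem union_inv (N : Int) (roots costs : List Int) (groups : List (List Int × Int))
    (a b : Int) (hI : InvS N roots costs groups)
    (ha1 : 1 ≤ a) (ha2 : a ≤ N) (hb1 : 1 ≤ b) (hb2 : b ≤ N) :
    InvS N (unionA (roots, costs) (a, b)).1 (unionA (roots, costs) (a, b)).2
      (mergeB groups (a, b)) := by
  have hnd : (groups.map (fun g => g.1)).flatten.Nodup :=
    hI.hperm.nodup_iff.2 (PySem.List.nodup_pyRange_one 1 (N+1))
  have hmemflat : ∀ x : Int, 1 ≤ x → x ≤ N → ∃ g ∈ groups, x ∈ g.1 := by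
    intro x h1 h2
    have hx : x ∈ PySem.List.pyRange 1 (N+1) 1 := PySem.List.mem_pyRange_one.2 ⟨h1, by omega⟩
    obtain ⟨ms, hms, hxms⟩ := List.mem_flatten.1 (hI.hperm.mem_iff.2 hx)
    obtain ⟨g, hg, rfl⟩ := List.mem_map.1 hms
    exact ⟨g, hg, hxms⟩
  obtain ⟨ia, hiaEq, hiaLt, hiaMem, hiaFirst⟩ := find_group groups a (hmemflat a ha1 ha2)
  obtain ⟨ib, hibEq, hibLt, hibMem, hibFirst⟩ := find_group groups b (hmemflat b hb1 hb2)
  have hGaG : groups.getD ia ([], 0) ∈ groups := by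
    rw [List.getD_eq_getElem _ _ hiaLt]; exact List.getElem_mem _
  have hGbG : groups.getD ib ([], 0) ∈ groups := by
    rw [List.getD_eq_getElem _ _ hibLt]; exact List.getElem_mem _
  obtain ⟨ra0, hra0mem, hra0root, hra0cost, hra0reach⟩ := hI.hcorr _ hGaG
  have hsubGa := inv_range hI hGaG
  have hclGa := hI.hclosed _ hGaG
  obtain ⟨e11, e12, e13, e14, frame1, root1, cost1, reach1, closed1⟩ :=
    findRoot_spec roots costs (groups.getD ia ([], 0)).1 (groups.getD ia ([], 0)).2 a ra0
      hsubGa hclGa hra0mem hra0root hra0cost hra0reach hiaMem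
  by_cases hij : ia = ib
  · -- both endpoints already in the same component: state compresses, groups unchanged
    have hbGa : b ∈ (groups.getD ia ([], 0)).1 := by rw [hij]; exact hibMem
    have hsubGa1 : ∀ x ∈ (groups.getD ia ([], 0)).1, 0 ≤ x ∧
        x.toNat < (findRootA roots costs a).1.1.length ∧
        x.toNat < (findRootA roots costs a).1.2.length := by
      intro x hx; have := hsubGa x hx; rw [e13, e14]; exact this
    obtain ⟨e21, e22, e23, e24, frame2, root2, cost2, reach2, closed2⟩ :=
      findRoot_spec (findRootA roots costs a).1.1 (findRootA roots costs a).1.2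
        (groups.getD ia ([], 0)).1 (groups.getD ia ([], 0)).2 b ra0
        hsubGa1 closed1 hra0mem root1 cost1 reach1 hbGa
    have hguard : (findRootA roots costs a).2.1 =
        (findRootA (findRootA roots costs a).1.1 (findRootA roots costs a).1.2 b).2.1 := by
      rw [e11, e21]
    have hunion : unionA (roots, costs) (a, b) =
        (findRootA (findRootA roots costs a).1.1 (findRootA roots costs a).1.2 b).1 := by
      simp only [unionA]
      rw [if_pos hguard]
    have hmerge : mergeB groups (a, b) = groups := by
      simp only [mergeB, hiaEq, hibEq]
      rw [if_pos hij]
    rw [hunion, hmerge]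
    refine ⟨by rw [e23, e13]; exact hI.hrl, by rw [e24, e14]; exact hI.hcll, hI.hperm, ?_, ?_⟩
    · intro g hg
      by_cases hov : ∀ y ∈ g.1, y ∉ (groups.getD ia ([], 0)).1
      · obtain ⟨r, hrmem, hrroot, hrcost, hrreach⟩ := hI.hcorr g hg
        have hagree : ∀ y ∈ g.1,
            pvGetA (findRootA (findRootA roots costs a).1.1 (findRootA roots costs a).1.2 b).1.1 y = pvGetA roots y ∧
            pvGetA (findRootA (findRootA roots costs a).1.1 (findRootA roots costs a).1.2 b).1.2 y = pvGetA costs y := by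
          intro y hy
          have hy0 : 0 ≤ y := (inv_range hI hg y hy).1
          have h1 := frame1 y hy0 (hov y hy)
          have h2 := frame2 y hy0 (hov y hy)
          exact ⟨h2.1.trans h1.1, h2.2.trans h1.2⟩
        obtain ⟨_, hroot', hcost', hreach'⟩ := group_frame roots costs _ _ g.1 g.2 r hagree
          (hI.hclosed g hg) hrmem hrroot hrcost hrreach
        exact ⟨r, hrmem, hroot', hcost', hreach'⟩
      · push_neg at hov
        obtain ⟨y, hyg, hyGa⟩ := hov
        have hgGa : g = groups.getD ia ([], 0) := mem_overlap groups hnd g hg _ hGaG y hyg hyGa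
        exact hgGa ▸ ⟨ra0, hra0mem, root2, cost2, reach2⟩
    · intro g hg
      by_cases hov : ∀ y ∈ g.1, y ∉ (groups.getD ia ([], 0)).1
      · intro x hx
        have hx0 : 0 ≤ x := (inv_range hI hg x hx).1
        have h1 := frame1 x hx0 (hov x hx)
        have h2 := frame2 x hx0 (hov x hx)
        rw [h2.1, h1.1]
        exact hI.hclosed g hg x hx
      · push_neg at hov
        obtain ⟨y, hyg, hyGa⟩ := hov
        have hgGa : g = groups.getD ia ([], 0) := mem_overlap groups hnd g hg _ hGaG y hyg hyGa
        exact hgGa ▸ closed2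
  · -- two different components: they merge
    have hGaNeGb : groups.getD ia ([], 0) ≠ groups.getD ib ([], 0) := by
      intro hEq
      rcases Nat.lt_or_ge ia ib with hlt | hge
      · exact (hibFirst ia hlt) (hEq ▸ hibMem)
      · exact (hiaFirst ib (by omega)) (hEq.symm ▸ hiaMem)
    have hdisjAB : ∀ y, y ∈ (groups.getD ia ([], 0)).1 → y ∈ (groups.getD ib ([], 0)).1 → False :=
      fun y h1 h2 => hGaNeGb (mem_overlap groups hnd _ hGaG _ hGbG y h1 h2)
    obtain ⟨rb0, hrb0mem, hrb0root, hrb0cost, hrb0reach⟩ := hI.hcorr _ hGbG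
    have hsubGb := inv_range hI hGbG
    have hclGb := hI.hclosed _ hGbG
    have hagreeGb : ∀ y ∈ (groups.getD ib ([], 0)).1,
        pvGetA (findRootA roots costs a).1.1 y = pvGetA roots y ∧
        pvGetA (findRootA roots costs a).1.2 y = pvGetA costs y :=
      fun y hy => frame1 y (hsubGb y hy).1 (fun hyGa => hdisjAB y hyGa hy)
    obtain ⟨hclGb1, hrootGb1, hcostGb1, hreachGb1⟩ := group_frame roots costs _ _
      (groups.getD ib ([], 0)).1 (groups.getD ib ([], 0)).2 rb0 hagreeGb hclGb hrb0mem
      hrb0root hrb0cost hrb0reach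
    have hsubGb1 : ∀ x ∈ (groups.getD ib ([], 0)).1, 0 ≤ x ∧
        x.toNat < (findRootA roots costs a).1.1.length ∧
        x.toNat < (findRootA roots costs a).1.2.length := by
      intro x hx; have := hsubGb x hx; rw [e13, e14]; exact this
    obtain ⟨e21, e22, e23, e24, frame2, root2, cost2, reach2, closed2⟩ :=
      findRoot_spec (findRootA roots costs a).1.1 (findRootA roots costs a).1.2
        (groups.getD ib ([], 0)).1 (groups.getD ib ([], 0)).2 b rb0
        hsubGb1 hclGb1 hrb0mem hrootGb1 hcostGb1 hreachGb1 hibMem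
    have hagreeGa2 : ∀ y ∈ (groups.getD ia ([], 0)).1,
        pvGetA (findRootA (findRootA roots costs a).1.1 (findRootA roots costs a).1.2 b).1.1 y =
          pvGetA (findRootA roots costs a).1.1 y ∧
        pvGetA (findRootA (findRootA roots costs a).1.1 (findRootA roots costs a).1.2 b).1.2 y =
          pvGetA (findRootA roots costs a).1.2 y := by
      intro y hy
      exact frame2 y (hsubGa y hy).1 (fun hyGb => hdisjAB y hy hyGb)
    obtain ⟨hclGa2, hrootGa2, hcostGa2, hreachGa2⟩ := group_frame _ _ _ _
      (groups.getD ia ([], 0)).1 (groups.getD ia ([], 0)).2 ra0 hagreeGa2 closed1 hra0mem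
      root1 cost1 reach1
    have hraNErb : ra0 ≠ rb0 := fun h => hdisjAB ra0 hra0mem (h ▸ hrb0mem)
    have hguard : ¬ ((findRootA roots costs a).2.1 =
        (findRootA (findRootA roots costs a).1.1 (findRootA roots costs a).1.2 b).2.1) := by
      rw [e11, e21]; exact hraNErb
    have hunion : unionA (roots, costs) (a, b) =
        (pvSetA (pvSetA (findRootA (findRootA roots costs a).1.1 (findRootA roots costs a).1.2 b).1.1 b a)
          (findRootA (findRootA roots costs a).1.1 (findRootA roots costs a).1.2 b).2.1 a,
         pvSetA (findRootA (findRootA roots costs a).1.1 (findRootA roots costs a).1.2 b).1.2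
          (findRootA roots costs a).2.1
          (min (findRootA roots costs a).2.2
            (findRootA (findRootA roots costs a).1.1 (findRootA roots costs a).1.2 b).2.2)) := by
      simp only [unionA]
      rw [if_neg hguard]
    have hfin : ∀ g ∈ groups, (∀ y ∈ g.1,
        ¬(y ∈ (groups.getD ia ([], 0)).1 ∨ y ∈ (groups.getD ib ([], 0)).1)) →
        (∃ r, r ∈ g.1 ∧
          IsRootL (findRootA (findRootA roots costs a).1.1 (findRootA roots costs a).1.2 b).1.1 r ∧
          pvGetA (findRootA (findRootA roots costs a).1.1 (findRootA roots costs a).1.2 b).1.2 r = g.2 ∧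
          ∀ x ∈ g.1, ReachL (findRootA (findRootA roots costs a).1.1 (findRootA roots costs a).1.2 b).1.1 x r) ∧
        ∀ x ∈ g.1, pvGetA (findRootA (findRootA roots costs a).1.1 (findRootA roots costs a).1.2 b).1.1 x ∈ g.1 := by
      intro g hg hav
      obtain ⟨r, hrmem, hrroot, hrcost, hrreach⟩ := hI.hcorr g hg
      have hagree : ∀ y ∈ g.1,
          pvGetA (findRootA (findRootA roots costs a).1.1 (findRootA roots costs a).1.2 b).1.1 y = pvGetA roots y ∧
          pvGetA (findRootA (findRootA roots costs a).1.1 (findRootA roots costs a).1.2 b).1.2 y = pvGetA costs y := by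
        intro y hy
        have hy0 : 0 ≤ y := (inv_range hI hg y hy).1
        have h1 := frame1 y hy0 (fun hx => hav y hy (Or.inl hx))
        have h2 := frame2 y hy0 (fun hx => hav y hy (Or.inr hx))
        exact ⟨h2.1.trans h1.1, h2.2.trans h1.2⟩
      obtain ⟨hclo', hroot', hcost', hreach'⟩ := group_frame roots costs _ _ g.1 g.2 r hagree
        (hI.hclosed g hg) hrmem hrroot hrcost hrreach
      exact ⟨⟨r, hrmem, hroot', hcost', hreach'⟩, hclo'⟩
    have hrl2 : (findRootA (findRootA roots costs a).1.1 (findRootA roots costs a).1.2 b).1.1.length = (N+1).toNat := by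
      rw [e23, e13]; exact hI.hrl
    have hcll2 : (N+1).toNat ≤ (findRootA (findRootA roots costs a).1.1 (findRootA roots costs a).1.2 b).1.2.length := by
      rw [e24, e14]; exact hI.hcll
    rcases Nat.lt_or_ge ia ib with hlt | hge
    · obtain ⟨l1, l2, l3, hdec, hlen1, hlen2⟩ := split_two groups ia ib hlt hibLt
      have hu : groups[ia] = groups.getD ia ([], 0) := (List.getD_eq_getElem _ _ hiaLt).symm
      have hv : groups[ib] = groups.getD ib ([], 0) := (List.getD_eq_getElem _ _ hibLt).symm
      have hdec' : groups = l1 ++ groups.getD ia ([], 0) :: l2 ++ groups.getD ib ([], 0) :: l3 := by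
        conv_lhs => rw [hdec]
        rw [hu, hv]
      have hmerge : mergeB groups (a, b) = (l1 ++ l2 ++ l3) ++
          [((groups.getD ia ([], 0)).1 ++ (groups.getD ib ([], 0)).1,
            min (groups.getD ia ([], 0)).2 (groups.getD ib ([], 0)).2)] := by
        simp only [mergeB, hiaEq, hibEq]
        rw [if_neg hij]
        congr 1
        conv_lhs => rw [hdec']
        rw [enumFilter_two _ _ l1 _ l2 _ l3 ?_]
        intro k
        push_cast [hlen1, hlen2]
        omega
      rw [hunion, hmerge, e11, e12, e21, e22]
      refine merged_inv N _ _ l1 l2 l3 (groups.getD ia ([], 0)) (groups.getD ib ([], 0))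
        (groups.getD ia ([], 0)) (groups.getD ib ([], 0)) a b ra0 rb0
        (Or.inl ⟨rfl, rfl⟩) hrl2 hcll2 (by rw [← hdec']; exact hI.hperm)
        hiaMem hibMem hra0mem hrb0mem hrootGa2 hcostGa2 hreachGa2 hclGa2
        root2 cost2 reach2 closed2 ?_
      intro g hg hav
      refine hfin g ?_ hav
      rw [hdec']
      rcases List.mem_append.1 hg with h12 | h3
      · rcases List.mem_append.1 h12 with h1 | h2
        · simp [h1]
        · simp [h2]
      · simp [h3]
    · have hlt' : ib < ia := by omega
      obtain ⟨l1, l2, l3, hdec, hlen1, hlen2⟩ := split_two groups ib ia hlt' hiaLt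
      have hu : groups[ib] = groups.getD ib ([], 0) := (List.getD_eq_getElem _ _ hibLt).symm
      have hv : groups[ia] = groups.getD ia ([], 0) := (List.getD_eq_getElem _ _ hiaLt).symm
      have hdec' : groups = l1 ++ groups.getD ib ([], 0) :: l2 ++ groups.getD ia ([], 0) :: l3 := by
        conv_lhs => rw [hdec]
        rw [hu, hv]
      have hmerge : mergeB groups (a, b) = (l1 ++ l2 ++ l3) ++
          [((groups.getD ia ([], 0)).1 ++ (groups.getD ib ([], 0)).1,
            min (groups.getD ia ([], 0)).2 (groups.getD ib ([], 0)).2)] := by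
        simp only [mergeB, hiaEq, hibEq]
        rw [if_neg hij]
        congr 1
        conv_lhs => rw [hdec']
        rw [enumFilter_two _ _ l1 _ l2 _ l3 ?_]
        intro k
        push_cast [hlen1, hlen2]
        omega
      rw [hunion, hmerge, e11, e12, e21, e22]
      refine merged_inv N _ _ l1 l2 l3 (groups.getD ib ([], 0)) (groups.getD ia ([], 0))
        (groups.getD ia ([], 0)) (groups.getD ib ([], 0)) a b ra0 rb0
        (Or.inr ⟨rfl, rfl⟩) hrl2 hcll2 (by rw [← hdec']; exact hI.hperm)
        hiaMem hibMem hra0mem hrb0mem hrootGa2 hcostGa2 hreachGa2 hclGa2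
        root2 cost2 reach2 closed2 ?_
      intro g hg hav
      refine hfin g ?_ hav
      rw [hdec']
      rcases List.mem_append.1 hg with h12 | h3
      · rcases List.mem_append.1 h12 with h1 | h2
        · simp [h1]
        · simp [h2]
      · simp [h3]


-- the initial state satisfies the invariant
theorem init_inv (N : Int) (A : List Int) (hNA : N ≤ (A.length : Int)) :
    InvS N (PySem.List.pyRange 0 (N+1) 1) ((0 : Int) :: A)
      ((PySem.List.pyRange 1 (N+1) 1).map (fun i => ([i], pvGetA A (i-1)))) := by
  have hlen : (PySem.List.pyRange 0 (N+1) 1).length = (N+1).toNat := by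
    rw [PySem.List.length_pyRange_one]; congr 1; omega
  have hget : ∀ i : Int, 0 ≤ i → i ≤ N → pvGetA (PySem.List.pyRange 0 (N+1) 1) i = i := by
    intro i h1 h2
    rw [pvGetA_eq_getElem _ _ h1 (by rw [hlen]; omega)]
    rw [PySem.List.getElem_pyRange_one]
    omega
  refine ⟨hlen, by simp [List.length_cons]; omega, ?_, ?_, ?_⟩
  · rw [List.map_map]
    have h2 : ((fun g => g.1) ∘ (fun i => (([i] : List Int), pvGetA A (i-1)))) =
        (fun i : Int => [i]) := rfl
    rw [h2]
    have h3 : ((PySem.List.pyRange 1 (N+1) 1).map (fun i : Int => [i])).flatten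
        = PySem.List.pyRange 1 (N+1) 1 := by
      induction PySem.List.pyRange 1 (N+1) 1 with
      | nil => rfl
      | cons x xs ih => simp [ih]
    rw [h3]
  · intro g hg
    obtain ⟨i, hi, rfl⟩ := List.mem_map.1 hg
    have hiB := PySem.List.mem_pyRange_one.1 hi
    have hroot : IsRootL (PySem.List.pyRange 0 (N+1) 1) i := hget i (by omega) (by omega)
    refine ⟨i, by simp, hroot, ?_, ?_⟩
    · show pvGetA ((0:Int) :: A) i = pvGetA A (i - 1)
      have hi1 : i = ((i-1).toNat : Int) + 1 := by omega
      rw [hi1]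
      have h4 : pvGetA ((0:Int) :: A) (((i-1).toNat : Int) + 1) = pvGetA A ((i-1).toNat : Int) := by
        simp [pvGetA, PySem.List.pyGet?_cons_succ]
      rw [h4]
      congr 2
      omega
    · intro x hx
      have hxi : x = i := by simpa using hx
      subst hxi
      exact reach_refl _ _ hroot
  · intro g hg
    obtain ⟨i, hi, rfl⟩ := List.mem_map.1 hg
    have hiB := PySem.List.mem_pyRange_one.1 hi
    intro x hx
    have hxi : x = i := by simpa using hx
    subst hxi
    simp [hget x (by omega) (by omega)]

-- A's final tally loop as a mapped sum
theorem foldl_if_sum (roots costs : List Int) (l : List Int) :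
    ∀ init : Int, l.foldl (fun t x => if pvGetA roots x ≠ x then t else t + pvGetA costs x) init
      = init + (l.map (fun x => if pvGetA roots x ≠ x then 0 else pvGetA costs x)).sum := by
  induction l with
  | nil => intro init; simp
  | cons x xs ih =>
    intro init
    rw [List.foldl_cons, ih, List.map_cons, List.sum_cons]
    by_cases h : pvGetA roots x ≠ x
    · rw [if_pos h, if_pos h]; ring
    · rw [if_neg h, if_neg h]; ring

theorem sum_single (f : Int → Int) (r v : Int) :
    ∀ l : List Int, l.Nodup → r ∈ l → (∀ x ∈ l, f x = if x = r then v else 0) →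
    (l.map f).sum = v := by
  have hzero : ∀ l : List Int, (∀ x ∈ l, f x = 0) → (l.map f).sum = 0 := by
    intro l
    induction l with
    | nil => intro _; simp
    | cons x xs ih => intro h; simp [h x (by simp), ih (fun y hy => h y (by simp [hy]))]
  intro l
  induction l with
  | nil => intro _ hr; simp at hr
  | cons x xs ih =>
    intro hnd hr hf
    rcases List.mem_cons.1 hr with hxr | hrxs
    · rw [List.map_cons, List.sum_cons, hf x (by simp), if_pos hxr.symm]
      have hz : (xs.map f).sum = 0 := by
        refine hzero xs ?_
        intro y hy
        rw [hf y (by simp [hy]), if_neg ?_]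
        intro hyr
        exact (List.nodup_cons.1 hnd).1 ((hyr.trans hxr) ▸ hy)
      rw [hz]; ring
    · rw [List.map_cons, List.sum_cons, hf x (by simp), if_neg ?_]
      · rw [ih (List.nodup_cons.1 hnd).2 hrxs (fun y hy => hf y (by simp [hy]))]; ring
      · intro hxr
        exact (List.nodup_cons.1 hnd).1 (hxr ▸ hrxs)

-- the final tally: one root per component, carrying the component minimum
theorem final_sum (N : Int) (roots costs : List Int) (groups : List (List Int × Int))
    (hI : InvS N roots costs groups) :
    (PySem.List.pyRange 1 (N+1) 1).foldl
        (fun t x => if pvGetA roots x ≠ x then t else t + pvGetA costs x) 0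
      = (groups.map (fun g => g.2)).sum := by
  have hnd : (groups.map (fun g => g.1)).flatten.Nodup :=
    hI.hperm.nodup_iff.2 (PySem.List.nodup_pyRange_one 1 (N+1))
  rw [foldl_if_sum]
  rw [zero_add]
  have hperm2 := (hI.hperm.symm.map
    (fun x => if pvGetA roots x ≠ x then 0 else pvGetA costs x)).sum_eq
  rw [hperm2]
  rw [List.map_flatten, List.sum_flatten, List.map_map, List.map_map]
  congr 1
  refine List.map_congr_left ?_
  intro g hg
  obtain ⟨r, hrmem, hroot, hcost, hreach⟩ := hI.hcorr g hg
  have hgnd : g.1.Nodup := by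
    have := (List.nodup_flatten.1 hnd).1
    exact this g.1 (List.mem_map_of_mem hg)
  show ((g.1.map (fun x => if pvGetA roots x ≠ x then 0 else pvGetA costs x))).sum = g.2
  refine sum_single _ r g.2 g.1 hgnd hrmem ?_
  intro x hx
  by_cases hxr : x = r
  · subst hxr
    rw [if_pos rfl, if_neg (by simpa [IsRootL] using hroot)]
    exact hcost
  · rw [if_neg hxr, if_pos ?_]
    intro hxroot
    exact hxr (reach_root roots x r hxroot (hreach x hx)).symm

-- the two edge loops evolve in lockstep
theorem fold_both (N : Int) (l : List (Int × Int)) :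
    ∀ (s : List Int × List Int) (groups : List (List Int × Int)),
    (∀ e ∈ l, 1 ≤ e.1 ∧ e.1 ≤ N ∧ 1 ≤ e.2 ∧ e.2 ≤ N) →
    InvS N s.1 s.2 groups →
    InvS N (l.foldl unionA s).1 (l.foldl unionA s).2 (l.foldl mergeB groups) := by
  induction l with
  | nil => intro s groups _ h; exact h
  | cons e rest ih =>
    intro s groups hb hInv
    obtain ⟨h1, h2, h3, h4⟩ := hb e (by simp)
    simp only [List.foldl_cons]
    refine ih _ _ (fun e' he' => hb e' (by simp [he'])) ?_
    have := union_inv N s.1 s.2 groups e.1 e.2 hInv h1 h2 h3 h4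
    simpa using this


-- ===== VERDICT (by name: the statement is the Claim_ definition above) =====
theorem solve_spec : Claim_equal_solve := by
  intro N K A friends hdom hpre
  obtain ⟨hNA, hedges⟩ := hpre
  show solve N K A friends = solve_alt N K A friends
  simp only [solve, solve_alt]
  have hInv := fold_both N friends
    (PySem.List.pyRange 0 (N+1) 1, (0:Int) :: A)
    ((PySem.List.pyRange 1 (N+1) 1).map (fun i => ([i], pvGetA A (i-1))))
    hedges (init_inv N A hNA)
  have htot := final_sum N _ _ _ hInv
  rw [htot]
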